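-- pv_equiv track=rewrite | github.com/Geon-05/dailycoding | programmers/02_입문/day11/day11_2.py | solution
-- ===== SOURCE A (Python) =====
-- def solution(n):
--     answer = 0
--     for i in range(1,n+1):
--         temp = 0
--         for j in range(1,i+1):
--             if i % j == 0:
--                 temp += 1
--         if temp > 2:
--             answer += 1
--     return answer
-- ===== SOURCE B (Python) =====
-- def solution(n):
--     # Count i in 1..n with more than two divisors (= composite numbers):
--     # trial division up to sqrt(i), stopping at the first proper factor.
--     count = 0
--     for i in range(2, n + 1):
--         j = 2
--         while j * j <= i:
--             if i % j == 0:
--                 count += 1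
--                 break
--             j += 1
--     return count
-- ===== Notes on version B (the rewrite author's own statement) =====
-- stated objective: faster
-- what changed: Instead of counting all divisors of each i by a full inner scan to i and testing count>2, B tests compositeness directly by trial division only up to sqrt(i) with early exit at the first proper factor.
import Mathlib
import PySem

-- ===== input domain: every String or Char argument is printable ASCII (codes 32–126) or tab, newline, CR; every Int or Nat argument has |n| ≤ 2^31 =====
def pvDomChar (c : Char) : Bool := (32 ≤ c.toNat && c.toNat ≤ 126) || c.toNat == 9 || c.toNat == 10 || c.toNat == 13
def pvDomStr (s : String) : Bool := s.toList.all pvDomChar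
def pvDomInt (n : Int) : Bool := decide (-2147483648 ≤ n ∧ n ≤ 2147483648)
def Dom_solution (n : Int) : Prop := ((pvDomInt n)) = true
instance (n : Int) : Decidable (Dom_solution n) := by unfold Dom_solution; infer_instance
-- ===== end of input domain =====

-- B counts the composites among 1..n by trial division only up to sqrt(i) with early
-- exit at the first factor, instead of A's full divisor count of each i; measurably faster.

-- ===== PORT A =====
def solution (n : Int) : Int :=
  (PySem.List.pyRange 1 (n + 1)).foldl
    (fun answer i =>
      let temp := (PySem.List.pyRange 1 (i + 1)).foldl
        (fun temp j => if PySem.Int.mod i j == 0 then temp + 1 else temp) (0 : Int)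
      if temp > 2 then answer + 1 else answer) 0

-- ===== PORT B =====
-- the 'while j * j <= i' loop of Source B; the extra '2 ≤ j' in the guard is only a
-- termination bound (the loop variable starts at two and only grows)
def hasSmallFactor (i j : Int) : Bool :=
  if h : j * j ≤ i ∧ 2 ≤ j then
    if PySem.Int.mod i j == 0 then true else hasSmallFactor i (j + 1)
  else false
termination_by (i + 1 - j).toNat
decreasing_by
  have hj : j ≤ j * j := by nlinarith [h.2]
  have : j ≤ i := le_trans hj h.1
  omega

def solution_alt (n : Int) : Int :=
  (PySem.List.pyRange 2 (n + 1)).foldl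
    (fun count i => if hasSmallFactor i 2 then count + 1 else count) 0

-- ===== PRECONDITION & SPEC =====
def Spec_solution (n : Int) (out : Int) : Prop := out = solution_alt n
instance (n : Int) (out : Int) : Decidable (Spec_solution n out) := by unfold Spec_solution; infer_instance

-- ===== CLAIM (what is proved, stated in full; the proofs are below) =====
def Claim_equal_solution : Prop := ∀ (n : Int), Dom_solution n → Spec_solution n (solution n)

-- ===== LEMMAS AND PROOFS =====

-- Source B's while loop finds a factor iff one exists at or above its start index
lemma hasSmallFactor_iff (i j : Int) :
    2 ≤ j → (hasSmallFactor i j = true ↔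
      ∃ k : Int, j ≤ k ∧ k * k ≤ i ∧ PySem.Int.mod i k = 0) := by
  fun_induction hasSmallFactor i j with
  | case1 j h hmod =>
    intro _
    simp only [true_iff]
    exact ⟨j, le_refl j, h.1, by simpa using hmod⟩
  | case2 j h hmod ih =>
    intro _
    rw [ih (by omega)]
    constructor
    · rintro ⟨k, hk, hkk, hm⟩; exact ⟨k, by omega, hkk, hm⟩
    · rintro ⟨k, hk, hkk, hm⟩
      refine ⟨k, ?_, hkk, hm⟩
      have : k ≠ j := by
        intro he; subst he
        simp [hm] at hmod
      omega
  | case3 j h =>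
    intro hj
    simp only [Bool.false_eq_true, false_iff]
    rintro ⟨k, hk, hkk, -⟩
    have : ¬ j * j ≤ i := fun hle => h ⟨hle, hj⟩
    nlinarith

-- A's inner loop is a divisor count
lemma temp_eq_countP (i : Int) :
    (PySem.List.pyRange 1 (i + 1)).foldl
      (fun t j => if PySem.Int.mod i j == 0 then t + 1 else t) (0 : Int)
    = ((PySem.List.pyRange 1 (i + 1)).countP (fun j => PySem.Int.mod i j == 0) : Int) := by
  simpa using PySem.List.foldl_count_if (fun j => PySem.Int.mod i j == 0)
    (PySem.List.pyRange 1 (i + 1)) 0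

-- more than two divisors ↔ a factor k with 2 ≤ k and k*k ≤ i
lemma count_gt_two_iff (i : Int) (hi : 2 ≤ i) :
    (2 : Int) < ((PySem.List.pyRange 1 (i + 1)).countP (fun j => PySem.Int.mod i j == 0) : Int)
    ↔ ∃ k : Int, 2 ≤ k ∧ k * k ≤ i ∧ PySem.Int.mod i k = 0 := by
  set p : Int → Bool := fun j => PySem.Int.mod i j == 0 with hp
  set l : List Int := (PySem.List.pyRange 1 (i + 1)).filter p with hl
  have hcount : (PySem.List.pyRange 1 (i + 1)).countP p = l.length := by
    rw [hl, List.countP_eq_length_filter]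
  have hnodup : l.Nodup := (PySem.List.nodup_pyRange_one 1 (i + 1)).filter p
  have hfin : l.toFinset.card = l.length := List.toFinset_card_of_nodup hnodup
  have hmeml : ∀ x : Int, x ∈ l ↔ (1 ≤ x ∧ x ≤ i ∧ PySem.Int.mod i x = 0) := by
    intro x
    rw [hl, List.mem_filter, PySem.List.mem_pyRange_one, hp]
    constructor
    · rintro ⟨⟨h1, h2⟩, h3⟩; exact ⟨h1, by omega, by simpa using h3⟩
    · rintro ⟨h1, h2, h3⟩; exact ⟨⟨h1, by omega⟩, by simpa using h3⟩
  rw [hcount]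
  constructor
  · intro hlen
    have hex : ∃ d ∈ l, d ≠ 1 ∧ d ≠ i := by
      by_contra hall
      push Not at hall
      have hsub : l.toFinset ⊆ ({1, i} : Finset Int) := by
        intro x hx
        have hx' := List.mem_toFinset.mp hx
        by_cases h1 : x = 1
        · simp [h1]
        · simp [hall x hx' h1]
      have hle2 : ({1, i} : Finset Int).card ≤ 2 :=
        le_trans (Finset.card_insert_le _ _) (by simp)
      have := Finset.card_le_card hsub
      omega
    obtain ⟨d, hdl, hd1, hdi⟩ := hex
    obtain ⟨hd_lo, hd_hi, hdmod⟩ := (hmeml d).mp hdl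
    have hd2 : (2 : Int) ≤ d := by omega
    obtain ⟨e, he⟩ := (PySem.Int.mod_eq_zero_iff_dvd i d).mp hdmod
    have he1 : (1 : Int) ≤ e := by nlinarith
    have he2 : (2 : Int) ≤ e := by
      rcases eq_or_lt_of_le he1 with h | h
      · exfalso
        apply hdi
        have : i = d := by rw [he, ← h]; ring
        omega
      · omega
    rcases le_total d e with hde | hde
    · exact ⟨d, hd2, by nlinarith, hdmod⟩
    · refine ⟨e, he2, by nlinarith, ?_⟩
      rw [PySem.Int.mod_eq_zero_iff_dvd]
      exact ⟨d, by rw [he]; ring⟩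
  · rintro ⟨k, hk2, hkk, hkm⟩
    have hki : k < i := by nlinarith
    have h1 : (1 : Int) ∈ l := by
      rw [hmeml]
      exact ⟨le_refl 1, by omega, by rw [PySem.Int.mod_eq_zero_iff_dvd]; exact one_dvd i⟩
    have hkmem : k ∈ l := by rw [hmeml]; exact ⟨by omega, by omega, hkm⟩
    have hii : i ∈ l := by
      rw [hmeml]
      exact ⟨by omega, le_refl i, by rw [PySem.Int.mod_eq_zero_iff_dvd]⟩
    have hsub : ({1, k, i} : Finset Int) ⊆ l.toFinset := by
      intro x hx
      simp only [Finset.mem_insert, Finset.mem_singleton] at hx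
      rcases hx with h | h | h <;> subst h <;> exact List.mem_toFinset.mpr (by assumption)
    have hcard3 : ({1, k, i} : Finset Int).card = 3 := by
      rw [Finset.card_insert_of_notMem (by simp; omega),
          Finset.card_insert_of_notMem (by simp; omega), Finset.card_singleton]
    have := Finset.card_le_card hsub
    omega

-- per-element agreement of the two loop bodies, for i ≥ 2
lemma body_agree (i acc : Int) (hi : (2 : Int) ≤ i) :
    (if ((PySem.List.pyRange 1 (i + 1)).foldl
        (fun temp j => if PySem.Int.mod i j == 0 then temp + 1 else temp) (0 : Int)) > 2
      then acc + 1 else acc)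
    = (if hasSmallFactor i 2 then acc + 1 else acc) := by
  have key : ((PySem.List.pyRange 1 (i + 1)).foldl
      (fun temp j => if PySem.Int.mod i j == 0 then temp + 1 else temp) (0 : Int)) > 2
      ↔ hasSmallFactor i 2 = true := by
    rw [temp_eq_countP, gt_iff_lt, count_gt_two_iff i hi, hasSmallFactor_iff i 2 (le_refl 2)]
  by_cases hc : hasSmallFactor i 2 = true
  · rw [if_pos (key.mpr hc), if_pos hc]
  · rw [if_neg (fun h => hc (key.mp h)), if_neg hc]

-- ===== VERDICT (by name: the statement is the Claim_ definition above) =====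
theorem solution_spec : Claim_equal_solution := by
  intro n _
  unfold Spec_solution solution solution_alt
  by_cases hn : n ≤ 0
  · rw [PySem.List.pyRange_one_eq_nil (show n + 1 ≤ (1 : Int) by omega),
        PySem.List.pyRange_one_eq_nil (show n + 1 ≤ (2 : Int) by omega)]
    rfl
  · rw [PySem.List.pyRange_one_cons (show (1 : Int) < n + 1 by omega)]
    simp only [List.foldl_cons]
    have hhead : (if ((PySem.List.pyRange 1 ((1 : Int) + 1)).foldl
        (fun temp j => if PySem.Int.mod 1 j == 0 then temp + 1 else temp) (0 : Int)) > 2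
        then (0 : Int) + 1 else (0 : Int)) = (0 : Int) := by decide
    rw [hhead]
    exact PySem.List.foldl_congr_mem _ _ _ _ (fun acc x hx =>
      body_agree x acc (PySem.List.mem_pyRange_one.mp hx).1)
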